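-- pv_equiv track=rewrite | github.com/JLR24/musicians_haven | website/mh/learn/static/chord.py | _GetDistance
-- ===== SOURCE A (Python) =====
-- SHARP_NOTES = ["A", "A#", "B", "C", "C#", "D", "D#", "E", "F", "F#", "G", "G#"]
--
-- NOTE_COUNT = 12
--
-- def _GetDistance(root, note):
--     '''Returns the "distance" between the root and given note'''
--     start = SHARP_NOTES.index(root)
--     count = 0
--     for i in range(NOTE_COUNT):
--         if SHARP_NOTES[(i + start) % NOTE_COUNT] == note:
--             return count
--         count += 1
--     return -1 # Something has broken...
-- ===== SOURCE B (Python) =====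
-- SHARP_NOTES = ["A", "A#", "B", "C", "C#", "D", "D#", "E", "F", "F#", "G", "G#"]
--
-- NOTE_COUNT = 12
--
-- def _GetDistance(root, note):
--     '''Returns the "distance" between the root and given note'''
--     start = SHARP_NOTES.index(root)
--     if note not in SHARP_NOTES:
--         return -1
--     return (SHARP_NOTES.index(note) - start) % NOTE_COUNT
-- ===== Notes on version B (the rewrite author's own statement) =====
-- stated objective: simpler
-- what changed: Replaced the 12-step scanning loop over rotated indices with a direct closed form: the wrap-around distance is (index(note) - index(root)) mod 12, keeping A's -1 sentinel for notes not in the scale.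
import Mathlib
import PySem

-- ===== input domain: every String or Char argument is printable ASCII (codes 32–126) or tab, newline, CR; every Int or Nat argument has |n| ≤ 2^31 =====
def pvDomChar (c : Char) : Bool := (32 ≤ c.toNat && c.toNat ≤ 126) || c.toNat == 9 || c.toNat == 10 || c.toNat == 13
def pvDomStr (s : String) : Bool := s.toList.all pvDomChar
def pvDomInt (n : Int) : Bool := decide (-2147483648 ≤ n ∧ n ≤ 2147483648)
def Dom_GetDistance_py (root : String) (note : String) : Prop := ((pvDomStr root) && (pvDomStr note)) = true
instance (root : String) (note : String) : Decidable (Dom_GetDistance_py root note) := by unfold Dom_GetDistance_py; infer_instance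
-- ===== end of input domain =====

-- B replaces A's 12-step scanning loop with the closed form (index(note) - index(root)) mod 12; objective: simpler.
-- Pre_ excludes exactly the inputs where Python A raises ValueError (root not in SHARP_NOTES).

-- ===== PORT A =====
def sharpNotes : List String := ["A", "A#", "B", "C", "C#", "D", "D#", "E", "F", "F#", "G", "G#"]

def noteCount : Int := 12

-- the for-loop of A: iterate over the range list, early-return count on a match, else -1
def aLoop (note : String) (start : Int) : List Int → Int → Int
  | [], _ => -1
  | i :: rest, count =>
    if (PySem.List.pyGet? sharpNotes (PySem.Int.mod (i + start) noteCount)).getD "" == note then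
      count
    else
      aLoop note start rest (count + 1)

def GetDistance_py (root : String) (note : String) : Int :=
  -- SHARP_NOTES.index(root): Pre_ guarantees membership, so the getD default is never taken
  let start : Int := ((PySem.List.index? sharpNotes root).map (Int.ofNat)).getD 0
  aLoop note start (PySem.List.pyRange 0 noteCount 1) 0

-- ===== PORT B =====
def GetDistance_py_alt (root : String) (note : String) : Int :=
  let start : Int := ((PySem.List.index? sharpNotes root).map (Int.ofNat)).getD 0
  match PySem.List.index? sharpNotes note with
  | none => -1
  | some j => PySem.Int.mod ((j : Int) - start) noteCount

-- ===== PRECONDITION & SPEC =====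
-- exactly the inputs where Python A returns normally: SHARP_NOTES.index(root) raises ValueError otherwise
def Pre_GetDistance_py (root : String) (_note : String) : Prop := root ∈ sharpNotes
instance (root : String) (note : String) : Decidable (Pre_GetDistance_py root note) := by unfold Pre_GetDistance_py; infer_instance
def pvWitness_GetDistance_py : String × String := ("C", "F#")

def Spec_GetDistance_py (root : String) (note : String) (out : Int) : Prop := out = GetDistance_py_alt root note
instance (root : String) (note : String) (out : Int) : Decidable (Spec_GetDistance_py root note out) := by unfold Spec_GetDistance_py; infer_instance

-- ===== CLAIM (what is proved, stated in full; the proofs are below) =====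
def Claim_equal_GetDistance_py : Prop := ∀ (root : String) (note : String), Dom_GetDistance_py root note → Pre_GetDistance_py root note → Spec_GetDistance_py root note (GetDistance_py root note)

-- ===== LEMMAS AND PROOFS =====

-- any index computed by the loop hits an element of sharpNotes, so if note is not in
-- the scale no iteration matches and the loop falls through to -1
theorem aLoop_of_not_mem (note : String) (hnote : note ∉ sharpNotes) :
    ∀ (xs : List Int) (start count : Int), aLoop note start xs count = -1 := by
  intro xs
  induction xs with
  | nil => intro start count; rfl
  | cons i rest ih =>
    intro start count
    have hpos : (0 : Int) < noteCount := by decide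
    have h0 : 0 ≤ PySem.Int.mod (i + start) noteCount := PySem.Int.mod_nonneg _ hpos
    have h1 : PySem.Int.mod (i + start) noteCount < noteCount := PySem.Int.mod_lt _ hpos
    have hget : ∃ x, PySem.List.pyGet? sharpNotes (PySem.Int.mod (i + start) noteCount) = some x ∧ x ∈ sharpNotes := by
      have hr : PySem.Raise.InRange sharpNotes.length (PySem.Int.mod (i + start) noteCount) := by
        have hc : noteCount = (12 : Int) := rfl
        rw [hc] at h0 h1 ⊢
        constructor <;> simp [sharpNotes] <;> omega
      rcases Option.ne_none_iff_exists'.mp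
        (fun hn => ((PySem.List.pyGet?_eq_none_iff _ _).mp hn) hr) with ⟨x, hx⟩
      exact ⟨x, hx, PySem.List.mem_of_pyGet?_eq_some _ hx⟩
    rcases hget with ⟨x, hx, hmem⟩
    have hne : (x == note) = false := by
      simp only [beq_eq_false_iff_ne]
      intro h; exact hnote (h ▸ hmem)
    simp only [aLoop, hx, Option.getD_some, hne]
    exact ih start (count + 1)

-- on the finite grid (root, note both in the scale) the two ports agree, by computation
theorem both_mem_eq : ∀ r ∈ sharpNotes, ∀ n ∈ sharpNotes,
    GetDistance_py r n = GetDistance_py_alt r n := by decide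

-- ===== VERDICT (by name: the statement is the Claim_ definition above) =====
theorem GetDistance_py_spec : Claim_equal_GetDistance_py := by
  intro root note _ hpre
  unfold Spec_GetDistance_py
  by_cases hn : note ∈ sharpNotes
  · exact both_mem_eq root hpre note hn
  · have hA : GetDistance_py root note = -1 := aLoop_of_not_mem note hn _ _ _
    have hB : GetDistance_py_alt root note = -1 := by
      unfold GetDistance_py_alt
      rw [(PySem.List.index?_eq_none_iff _ _).mpr hn]
    rw [hA, hB]
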